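-- pv_equiv track=rewrite | github.com/Issyl-m/MinimalResolution | minr.py | get_admissible_generators_for_degree
-- ===== SOURCE A (Python) =====
-- def is_admissible(list_monomial_power):
--     r = True
--
--     len_list_monomial_power = len(list_monomial_power)
--
--     for i in range(0, len_list_monomial_power):
--         if i + 1 < len_list_monomial_power:
--             r = r and (list_monomial_power[i] >= 2*list_monomial_power[i + 1])
--         else:
--             break ## TODO: rewrite
--
--     return r
--
-- def bin_length(k):
--     r = k
--     k_binary_length = 0
--     while r > 0:
--         r = r >> 1
--         k_binary_length += 1
--
--     return k_binary_length
--
-- def get_admissible_generators_for_degree(k, k_binary_length = -1):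
--     list_list_generators = []
--
--     if k_binary_length == -1:
--         k_binary_length = bin_length(k)
--
--     for fixed_length_product_monomials in range(1, k_binary_length + 1):
--         if fixed_length_product_monomials == 1:
--             list_list_generators.append([k])
--         else:
--             for biggest_power in range(2**(fixed_length_product_monomials-1), k - fixed_length_product_monomials + 2):
--                 list_list_admissible_generators = get_admissible_generators_for_degree(k-biggest_power, fixed_length_product_monomials - 1)
--
--                 for j in range(0, len(list_list_admissible_generators)):
--                     list_list_admissible_generators[j].insert(0, biggest_power)
--
--                     if is_admissible(list_list_admissible_generators[j]):
--                         if not list_list_admissible_generators[j] in list_list_generators: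
--                             list_list_generators.append(list_list_admissible_generators[j])
--
--     return list_list_generators
-- ===== SOURCE B (Python) =====
-- # B: direct admissible-sequence enumerator -- builds only legal length-L sequences
-- # (first element in [2^(L-1), k-L+1], tail recursively with a >= 2*t[0]), so no
-- # is_admissible filter pass and no dedup membership scan over the output are needed.
-- def _gen(n, L):
--     """All admissible length-L sequences of positive-degree pattern summing to n."""
--     if L == 1:
--         return [[n]]
--     return [[a] + t
--             for a in range(2 ** (L - 1), n - L + 2)
--             for t in _gen(n - a, L - 1)
--             if a >= 2 * t[0]]
--
-- def get_admissible_generators_for_degree(k, k_binary_length=-1):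
--     blen = k.bit_length() if k > 0 else 0
--     if k_binary_length == -1:
--         k_binary_length = blen
--     out = []
--     if k_binary_length >= 1:
--         out.append([k])
--     for L in range(2, min(k_binary_length, blen) + 1):
--         out.extend(_gen(k, L))
--     return out
-- ===== Notes on version B (the rewrite author's own statement) =====
-- stated objective: alternative
-- what changed: B enumerates admissible length-L sequences directly (first element from 2^(L-1) ascending, tail recursively, with the condition a>=2*t[0] applied while building) and caps the length loop at min(cap, bit_length(k)), so A's is_admissible filter pass, its 'not in' dedup scan over the output, and its generation of shorter tails that are immediately re-discarded all disappear.
import Mathlib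
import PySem

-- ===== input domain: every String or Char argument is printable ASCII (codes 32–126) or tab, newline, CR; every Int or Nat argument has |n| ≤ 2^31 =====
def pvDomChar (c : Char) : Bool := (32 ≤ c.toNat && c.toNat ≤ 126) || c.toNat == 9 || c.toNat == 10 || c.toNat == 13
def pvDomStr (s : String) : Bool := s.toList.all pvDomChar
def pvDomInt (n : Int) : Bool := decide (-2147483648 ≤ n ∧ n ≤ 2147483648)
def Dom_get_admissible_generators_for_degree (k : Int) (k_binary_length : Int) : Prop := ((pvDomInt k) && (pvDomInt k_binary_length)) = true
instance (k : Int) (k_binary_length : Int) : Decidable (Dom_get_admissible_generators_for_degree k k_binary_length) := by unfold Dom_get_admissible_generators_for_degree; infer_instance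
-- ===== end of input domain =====

-- B replaces A's generate-filter-dedup recursion by a direct enumerator of admissible
-- length-L sequences (no is_admissible pass, no membership scan over the output).

-- ===== PORT A =====

-- is_admissible: indexed loop `for i in range(0, n): if i+1 < n: r = r and (l[i] >= 2*l[i+1]) else break`
def isAdmAux (l : List Int) (i : Nat) (r : Bool) : Bool :=
  if i < l.length then
    if i + 1 < l.length then
      isAdmAux l (i + 1) (r && decide (PySem.List.pyGetD l (i : Int) 0 ≥ 2 * PySem.List.pyGetD l ((i : Int) + 1) 0))
    else r  -- break
  else r
termination_by l.length - i

def is_admissible (l : List Int) : Bool := isAdmAux l 0 true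

-- bin_length: `r = k; c = 0; while r > 0: r = r >> 1; c += 1`
def binLenAux (r : Int) (c : Int) : Int :=
  if h : 0 < r then binLenAux (r >>> (1 : Nat)) (c + 1) else c
termination_by r.toNat
decreasing_by
  have : r >>> (1 : Nat) = r / 2 ^ (1 : Nat) := Int.shiftRight_eq_div_pow r 1
  omega

def bin_length (k : Int) : Int := binLenAux k 0

-- Main body of A, with the `k_binary_length == -1` default already resolved by the wrapper
-- below: Python's recursive calls pass `fixed_length_product_monomials - 1 ≥ 1 ≠ -1`, so the
-- `== -1` branch never fires inside the recursion and calling Aaux directly is exact.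
def Aaux (k : Int) (cap : Int) : List (List Int) :=
  ((PySem.List.pyRange 1 (cap + 1) 1).attach).foldl (fun acc L =>
    if L.1 = 1 then
      acc ++ [[k]]
    else
      (PySem.List.pyRange (2 ^ (L.1 - 1).toNat) (k - L.1 + 2) 1).foldl (fun acc2 bp =>
        (Aaux (k - bp) (L.1 - 1)).foldl (fun acc3 tail =>
          if is_admissible (bp :: tail) && !(acc3.contains (bp :: tail)) then
            acc3 ++ [bp :: tail]
          else acc3) acc2) acc) []
termination_by cap.toNat
decreasing_by
  have h := PySem.List.mem_pyRange_one.mp L.2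
  omega

def get_admissible_generators_for_degree (k : Int) (k_binary_length : Int) : List (List Int) :=
  Aaux k (if k_binary_length = -1 then bin_length k else k_binary_length)

-- ===== PORT B =====

-- _gen(n, L): all admissible length-L sequences summing to n (list comprehension)
def genB (n : Int) : Nat → List (List Int)
  | 0 => []        -- never called with L < 1 in Source B
  | 1 => [[n]]
  | (m + 2) =>
      (PySem.List.pyRange (2 ^ (m + 1)) (n - ((m : Int) + 2) + 2) 1).flatMap (fun a =>
        ((genB (n - a) (m + 1)).filter (fun t => decide (a ≥ 2 * t.headI))).map (fun t => a :: t))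

def get_admissible_generators_for_degree_alt (k : Int) (k_binary_length : Int) : List (List Int) :=
  let blen : Int := if 0 < k then (PySem.Int.bitLength k : Int) else 0   -- k.bit_length() if k > 0 else 0
  let cap : Int := if k_binary_length = -1 then blen else k_binary_length
  let out : List (List Int) := if 1 ≤ cap then [[k]] else []
  (PySem.List.pyRange 2 (min cap blen + 1) 1).foldl (fun acc L => acc ++ genB k L.toNat) out

-- ===== PRECONDITION & SPEC =====
def Spec_get_admissible_generators_for_degree (k : Int) (k_binary_length : Int) (out : List (List Int)) : Prop := out = get_admissible_generators_for_degree_alt k k_binary_length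
instance (k : Int) (k_binary_length : Int) (out : List (List Int)) : Decidable (Spec_get_admissible_generators_for_degree k k_binary_length out) := by unfold Spec_get_admissible_generators_for_degree; infer_instance

-- ===== CLAIM (what is proved, stated in full; the proofs are below) =====
def Claim_equal_get_admissible_generators_for_degree : Prop := ∀ (k : Int) (k_binary_length : Int), Dom_get_admissible_generators_for_degree k k_binary_length → Spec_get_admissible_generators_for_degree k k_binary_length (get_admissible_generators_for_degree k k_binary_length)

-- ===== LEMMAS AND PROOFS =====

-- recursive characterization of A's is_admissible loop
def pairsOK : List Int → Bool
  | a :: b :: t => decide (a ≥ 2 * b) && pairsOK (b :: t)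
  | _ => true

theorem isAdmAux_eq (l : List Int) (i : Nat) (r : Bool) :
    isAdmAux l i r = (r && pairsOK (l.drop i)) := by
  induction hN : l.length - i generalizing i r with
  | zero =>
    rw [isAdmAux]
    have hle : l.length ≤ i := by omega
    simp [Nat.not_lt.mpr hle, List.drop_eq_nil_of_le hle, pairsOK]
  | succ N ih =>
    rw [isAdmAux]
    have hi : i < l.length := by omega
    by_cases h2 : i + 1 < l.length
    · simp only [hi, h2, if_true]
      rw [ih (i+1) _ (by omega)]
      have hget : PySem.List.pyGetD l (i : Int) 0 = l[i] := by
        rw [PySem.List.pyGetD_natCast]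
        exact List.getD_eq_getElem l 0 hi
      have hget2 : PySem.List.pyGetD l ((i : Int) + 1) 0 = l[i+1] := by
        rw [show ((i : Int) + 1) = ((i + 1 : Nat) : Int) by push_cast; ring]
        rw [PySem.List.pyGetD_natCast]
        exact List.getD_eq_getElem l 0 h2
      have hdrop : l.drop i = l[i] :: l[i+1] :: l.drop (i+2) := by
        rw [List.drop_eq_getElem_cons hi]
        congr 1
        rw [List.drop_eq_getElem_cons h2]
      rw [hget, hget2, hdrop]
      have hdrop1 : l.drop (i+1) = l[i+1] :: l.drop (i+2) := by
        rw [List.drop_eq_getElem_cons h2]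
      rw [hdrop1, pairsOK]
      cases r <;> simp [Bool.and_assoc]
    · have hlast : i + 1 = l.length := by omega
      simp only [hi, h2, if_true, if_false]
      have : l.drop i = [l[i]] := by
        rw [List.drop_eq_getElem_cons hi]
        simp [List.drop_eq_nil_of_le (by omega : l.length ≤ i + 1)]
      simp [this, pairsOK]

theorem is_admissible_eq (l : List Int) : is_admissible l = pairsOK l := by
  rw [is_admissible, isAdmAux_eq]; simp

-- A's bin_length equals Python's bit_length (for k > 0; else 0)
theorem binLenAux_eq (r c : Int) (hr : 0 ≤ r) :
    binLenAux r c = c + (PySem.Int.bitLength r : Int) := by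
  induction hN : r.toNat using Nat.strong_induction_on generalizing r c with
  | _ N ih =>
  by_cases hpos : 0 < r
  case neg =>
    have : r = 0 := by omega
    subst this
    rw [binLenAux]
    simp [PySem.Int.bitLength_zero]
  case pos =>
    rw [binLenAux]
    simp only [hpos, dif_pos]
    have hsh : r >>> (1 : Nat) = r / 2 := by
      have := Int.shiftRight_eq_div_pow r 1
      norm_num at this
      exact this
    have hfd : PySem.Int.floordiv r 2 = r / 2 := PySem.Int.floordiv_eq_ediv_of_pos (by norm_num)
    rw [hsh]
    rw [ih (r / 2).toNat (by omega) (r / 2) (c+1) (by omega) rfl]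
    rw [PySem.Int.bitLength_of_pos hpos, hfd]
    push_cast
    ring

theorem bin_length_eq (k : Int) :
    bin_length k = (if 0 < k then (PySem.Int.bitLength k : Int) else 0) := by
  by_cases h : 0 < k
  · rw [bin_length, binLenAux_eq k 0 (by omega)]; simp [h]
  · rw [bin_length, binLenAux]
    simp [h]

-- ---- genB structural lemmas ----

theorem genB_two_eq (n : Int) (m : Nat) :
    genB n (m + 2) = (PySem.List.pyRange (2 ^ (m + 1)) (n - ((m : Int) + 2) + 2) 1).flatMap
      (fun a => ((genB (n - a) (m + 1)).filter (fun t => decide (a ≥ 2 * t.headI))).map (fun t => a :: t)) := by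
  rw [genB]

theorem length_of_mem_genB : ∀ (L : Nat) (n : Int) (t : List Int), t ∈ genB n L → t.length = L := by
  intro L
  induction L using Nat.strong_induction_on with
  | _ L ih =>
    intro n t ht
    match L with
    | 0 => simp [genB] at ht
    | 1 => simp [genB] at ht; simp [ht]
    | (m+2) =>
      rw [genB_two_eq] at ht
      obtain ⟨a, _, t', ht', rfl⟩ := by
        simpa using ht
      have := ih (m+1) (by omega) (n - a) t' ht'.1
      simp [this]

theorem ne_nil_of_mem_genB (L : Nat) (n : Int) (t : List Int) (hL : 1 ≤ L) (ht : t ∈ genB n L) : t ≠ [] := by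
  have := length_of_mem_genB L n t ht
  intro h; subst h; simp at this; omega

theorem pairsOK_of_mem_genB : ∀ (L : Nat) (n : Int) (t : List Int), t ∈ genB n L → pairsOK t = true := by
  intro L
  induction L using Nat.strong_induction_on with
  | _ L ih =>
    intro n t ht
    match L with
    | 0 => simp [genB] at ht
    | 1 => simp [genB] at ht; simp [ht, pairsOK]
    | (m+2) =>
      rw [genB_two_eq] at ht
      obtain ⟨a, _, t', ht', rfl⟩ := by simpa using ht
      obtain ⟨ht'mem, ht'cond⟩ := ht'
      have hok := ih (m+1) (by omega) (n - a) t' ht'mem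
      have hlen := length_of_mem_genB (m+1) (n - a) t' ht'mem
      match t', hlen with
      | h :: rest, _ =>
        rw [pairsOK]
        simp only [List.headI] at ht'cond
        simp [ht'cond, hok]

theorem nodup_genB : ∀ (L : Nat) (n : Int), (genB n L).Nodup := by
  intro L
  induction L using Nat.strong_induction_on with
  | _ L ih =>
    intro n
    match L with
    | 0 => simp [genB]
    | 1 => simp [genB]
    | (m+2) =>
      rw [genB_two_eq]
      rw [List.nodup_flatMap]
      constructor
      · intro a _
        exact ((ih (m+1) (by omega) (n - a)).filter _).map (by
          intro x y hxy
          simpa using hxy)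
      · have hpw := PySem.List.pairwise_lt_pyRange_one (a := 2 ^ (m+1)) (b := n - ((m : Int) + 2) + 2)
        refine hpw.imp ?_
        intro a b hab
        intro s hsa hsb
        simp only [List.mem_map] at hsa hsb
        obtain ⟨t1, _, h1⟩ := hsa
        obtain ⟨t2, _, h2⟩ := hsb
        rw [← h1] at h2
        exact absurd (List.cons.injEq .. ▸ h2).1.symm (by omega)

-- genB is empty once the first-element range is empty; in particular beyond the bit length
theorem genB_nil_of_range_empty (n : Int) (m : Nat) (h : n - ((m : Int) + 2) + 2 ≤ 2 ^ (m + 1)) :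
    genB n (m + 2) = [] := by
  rw [genB_two_eq, PySem.List.pyRange_one_eq_nil h]
  rfl

theorem genB_nil_of_big (k L : Int) (hL : 2 ≤ L)
    (h : k ≤ 0 ∨ (0 < k ∧ (PySem.Int.bitLength k : Int) < L)) :
    genB k L.toNat = [] := by
  obtain ⟨m, hm⟩ : ∃ m : Nat, L.toNat = m + 2 := ⟨L.toNat - 2, by omega⟩
  rw [hm]
  apply genB_nil_of_range_empty
  have hmL : L = (m : Int) + 2 := by omega
  rcases h with hk | ⟨hk, hbl⟩
  · have : (0:Int) < 2 ^ (m+1) := by positivity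
    omega
  · have h1 : k.natAbs < 2 ^ PySem.Int.bitLength k := PySem.Int.lt_two_pow_bitLength k
    have h2 : PySem.Int.bitLength k ≤ m + 1 := by omega
    have h3 : (2:Nat) ^ PySem.Int.bitLength k ≤ 2 ^ (m+1) := Nat.pow_le_pow_right (by norm_num) h2
    have h4 : k < (2:Int) ^ (m+1) := by
      have : (k.natAbs : Int) = k := Int.natAbs_of_nonneg (by omega)
      rw [← this]
      exact_mod_cast lt_of_lt_of_le h1 h3
    omega

-- ---- plain-foldl view of A's recursion ----

def stepA (bp : Int) (acc : List (List Int)) (tail : List Int) : List (List Int) :=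
  if is_admissible (bp :: tail) && !(acc.contains (bp :: tail)) then acc ++ [bp :: tail] else acc

def roundA (k : Int) (acc : List (List Int)) (L : Int) : List (List Int) :=
  if L = 1 then
    acc ++ [[k]]
  else
    (PySem.List.pyRange (2 ^ (L - 1).toNat) (k - L + 2) 1).foldl (fun acc2 bp =>
      (Aaux (k - bp) (L - 1)).foldl (stepA bp) acc2) acc

theorem foldl_attach_val {α β : Type} (l : List α) (g : β → α → β) (init : β) :
    l.attach.foldl (fun acc x => g acc x.1) init = l.foldl g init := by
  conv_rhs => rw [← List.attach_map_subtype_val l]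
  rw [List.foldl_map]

theorem Aaux_eq_foldl (k cap : Int) :
    Aaux k cap = (PySem.List.pyRange 1 (cap + 1) 1).foldl (roundA k) [] := by
  rw [Aaux]
  exact foldl_attach_val _ (roundA k) []

-- ---- the specification list: lengths 1..c, in order ----

def catAB (k c : Int) : List (List Int) :=
  (PySem.List.pyRange 1 (c + 1) 1).flatMap (fun L => genB k L.toNat)

theorem catAB_nonpos (k c : Int) (hc : c ≤ 0) : catAB k c = [] := by
  rw [catAB, PySem.List.pyRange_one_eq_nil (by omega)]
  rfl

theorem catAB_succ (k c : Int) (hc : 1 ≤ c) :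
    catAB k c = catAB k (c - 1) ++ genB k c.toNat := by
  rw [catAB, catAB]
  rw [show c + 1 = (c - 1 + 1) + 1 by ring]
  rw [PySem.List.pyRange_one_succ_right (by omega)]
  simp

theorem mem_catAB {k c : Int} {s : List Int} :
    s ∈ catAB k c ↔ ∃ L : Int, 1 ≤ L ∧ L ≤ c ∧ s ∈ genB k L.toNat := by
  rw [catAB]
  simp only [List.mem_flatMap, PySem.List.mem_pyRange_one]
  constructor
  · rintro ⟨L, ⟨h1, h2⟩, hs⟩; exact ⟨L, h1, by omega, hs⟩
  · rintro ⟨L, h1, h2, hs⟩; exact ⟨L, ⟨h1, by omega⟩, hs⟩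

theorem length_of_mem_catAB {k c : Int} {s : List Int} (hs : s ∈ catAB k c) :
    1 ≤ s.length ∧ (s.length : Int) ≤ c := by
  obtain ⟨L, h1, h2, hmem⟩ := mem_catAB.mp hs
  have := length_of_mem_genB L.toNat k s hmem
  omega

-- promotion: an admissible extension of a shorter genB-sequence is itself a genB-sequence
theorem genB_promote (k bp : Int) (m : Nat) (t : List Int)
    (ht : t ∈ genB (k - bp) (m + 1)) (hadm : bp ≥ 2 * t.headI)
    (hlo : (2:Int) ^ (m + 1) ≤ bp) (hhi : bp < k - ((m : Int) + 2) + 2) :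
    bp :: t ∈ genB k (m + 2) := by
  rw [genB_two_eq]
  rw [List.mem_flatMap]
  refine ⟨bp, PySem.List.mem_pyRange_one.mpr ⟨hlo, hhi⟩, ?_⟩
  simp only [List.mem_map, List.mem_filter]
  exact ⟨t, ⟨ht, by simpa using hadm⟩, rfl⟩

-- ---- the dedup fold: skip part and append part ----

theorem fold_skip (bp : Int) : ∀ (ts : List (List Int)) (acc : List (List Int)),
    (∀ t ∈ ts, is_admissible (bp :: t) = true → (bp :: t) ∈ acc) →
    ts.foldl (stepA bp) acc = acc := by
  intro ts
  induction ts with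
  | nil => intro acc _; rfl
  | cons t ts ih =>
    intro acc h
    have hstep : stepA bp acc t = acc := by
      rw [stepA]
      by_cases hadm : is_admissible (bp :: t) = true
      · have hmem := h t (by simp) hadm
        simp [hadm, hmem]
      · simp [Bool.eq_false_iff.mpr hadm]
    rw [List.foldl_cons, hstep]
    exact ih acc (fun t' ht' => h t' (by simp [ht']))

theorem fold_app (bp : Int) : ∀ (ts : List (List Int)) (acc : List (List Int)),
    ts.Nodup → (∀ t ∈ ts, pairsOK t = true ∧ t ≠ []) → (∀ t ∈ ts, (bp :: t) ∉ acc) →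
    ts.foldl (stepA bp) acc
      = acc ++ (ts.filter (fun t => decide (bp ≥ 2 * t.headI))).map (fun t => bp :: t) := by
  intro ts
  induction ts with
  | nil => intro acc _ _ _; simp
  | cons t ts ih =>
    intro acc hnd hok hnm
    obtain ⟨hokt, hne⟩ := hok t (by simp)
    have hadm : is_admissible (bp :: t) = decide (bp ≥ 2 * t.headI) := by
      rw [is_admissible_eq]
      match t, hne with
      | h :: rest, _ =>
        rw [pairsOK]
        simp only [List.headI]
        rw [show pairsOK (h :: rest) = true from hokt]
        simp
    rw [List.foldl_cons]
    by_cases hc : bp ≥ 2 * t.headI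
    · have hnotin : (bp :: t) ∉ acc := hnm t (by simp)
      have hstep : stepA bp acc t = acc ++ [bp :: t] := by
        rw [stepA, hadm]
        simp [hc, hnotin]
      have hrest : ∀ t' ∈ ts, (bp :: t') ∉ acc ++ [bp :: t] := by
        intro t' ht' hmem
        rcases List.mem_append.mp hmem with h | h
        · exact hnm t' (by simp [ht']) h
        · have heq : bp :: t' = bp :: t := List.mem_singleton.mp h
          have : t' = t := by simpa using heq
          exact (List.nodup_cons.mp hnd).1 (this ▸ ht')
      rw [hstep, ih (acc ++ [bp :: t]) hnd.of_cons
          (fun t' ht' => hok t' (by simp [ht'])) hrest]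
      rw [List.filter_cons_of_pos (by simpa using hc), List.map_cons]
      simp
    · have hstep : stepA bp acc t = acc := by
        rw [stepA, hadm]
        simp [hc]
      rw [hstep, ih acc hnd.of_cons (fun t' ht' => hok t' (by simp [ht']))
          (fun t' ht' => hnm t' (by simp [ht']))]
      rw [List.filter_cons_of_neg (by simpa using hc)]

-- F bp: the new sequences contributed by first element bp at length c
def newF (k c bp : Int) : List (List Int) :=
  ((genB (k - bp) (c - 1).toNat).filter (fun t => decide (bp ≥ 2 * t.headI))).map (fun t => bp :: t)

theorem bpfold (k c : Int) (hc : 2 ≤ c) :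
    ∀ (bps : List Int) (ACC : List (List Int)),
      bps.Nodup →
      (∀ bp ∈ bps, (2:Int) ^ (c - 1).toNat ≤ bp ∧ bp < k - c + 2) →
      (∀ L : Int, 1 ≤ L → L ≤ c - 1 → ∀ s ∈ genB k L.toNat, s ∈ ACC) →
      (∀ bp ∈ bps, ∀ t ∈ genB (k - bp) (c - 1).toNat, (bp :: t) ∉ ACC) →
      bps.foldl (fun acc2 bp => (catAB (k - bp) (c - 1)).foldl (stepA bp) acc2) ACC
        = ACC ++ bps.flatMap (newF k c) := by
  intro bps
  induction bps with
  | nil => intro ACC _ _ _ _; simp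
  | cons bp0 bps ih =>
    intro ACC hnd hbnd hsub hnm
    rw [List.foldl_cons]
    have hbnd0 := hbnd bp0 (by simp)
    -- the inner fold over all shorter tails, then the length-(c-1) tails
    have hsplit : catAB (k - bp0) (c - 1) = catAB (k - bp0) (c - 2) ++ genB (k - bp0) (c-1).toNat := by
      have := catAB_succ (k - bp0) (c - 1) (by omega)
      rwa [show c - 1 - 1 = c - 2 by ring] at this
    have hinner : (catAB (k - bp0) (c - 1)).foldl (stepA bp0) ACC = ACC ++ newF k c bp0 := by
      rw [hsplit, List.foldl_append]
      rw [fold_skip bp0 _ ACC ?_]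
      · rw [fold_app bp0 _ ACC (nodup_genB _ _)
            (fun t ht => ⟨pairsOK_of_mem_genB _ _ t ht,
              ne_nil_of_mem_genB _ _ t (by omega) ht⟩)
            (fun t ht => hnm bp0 (by simp) t ht)]
        rfl
      · -- shorter admissible extensions were already produced at their own length
        intro t ht hadm
        obtain ⟨L, hL1, hL2, hmem⟩ := mem_catAB.mp ht
        obtain ⟨m, hm⟩ : ∃ m : Nat, L.toNat = m + 1 := ⟨L.toNat - 1, by omega⟩
        have hLm : L = (m : Int) + 1 := by omega
        have htOK := pairsOK_of_mem_genB _ _ t hmem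
        have htne := ne_nil_of_mem_genB L.toNat _ t (by omega) hmem
        have hadm' : bp0 ≥ 2 * t.headI := by
          rw [is_admissible_eq] at hadm
          match t, htne with
          | h :: rest, _ =>
            rw [pairsOK] at hadm
            simp only [Bool.and_eq_true, decide_eq_true_eq] at hadm
            simpa using hadm.1
        have hpromote : bp0 :: t ∈ genB k (m + 2) := by
          apply genB_promote k bp0 m t (hm ▸ hmem) hadm'
          · calc (2:Int) ^ (m+1) ≤ 2 ^ (c-1).toNat := by
                  apply pow_le_pow_right₀ (by norm_num)
                  omega
              _ ≤ bp0 := hbnd0.1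
          · omega
        have : bp0 :: t ∈ ACC := by
          have h2 := hsub ((m : Int) + 2) (by omega) (by omega) (bp0 :: t) (by
            rwa [show ((m : Int) + 2).toNat = m + 2 by omega])
          exact h2
        exact this
    rw [hinner]
    rw [ih (ACC ++ newF k c bp0) hnd.of_cons
        (fun bp hbp => hbnd bp (by simp [hbp]))
        (fun L h1 h2 s hs => by
          simp only [List.mem_append]
          exact Or.inl (hsub L h1 h2 s hs))
        (fun bp hbp t ht => by
          simp only [List.mem_append]
          push_neg
          refine ⟨hnm bp (by simp [hbp]) t ht, ?_⟩
          intro hmem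
          rw [newF] at hmem
          simp only [List.mem_map] at hmem
          obtain ⟨t', _, hEq⟩ := hmem
          have : bp = bp0 := (List.cons.injEq .. ▸ hEq.symm).1
          exact (List.nodup_cons.mp hnd).1 (this ▸ hbp))]
    simp

-- one round of A's outer loop at length c ≥ 2, assuming the recursion already matches catAB
theorem roundA_eq (k c : Int) (hc : 2 ≤ c)
    (hrec : ∀ bp : Int, Aaux (k - bp) (c - 1) = catAB (k - bp) (c - 1)) :
    roundA k (catAB k (c - 1)) c = catAB k c := by
  rw [roundA]
  rw [if_neg (by omega)]
  simp only [hrec]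
  rw [bpfold k c hc _ _ (PySem.List.nodup_pyRange_one _ _)
      (fun bp hbp => by
        have := PySem.List.mem_pyRange_one.mp hbp
        exact ⟨this.1, by omega⟩)
      (fun L h1 h2 s hs => mem_catAB.mpr ⟨L, h1, by omega, hs⟩)
      (fun bp _ t ht => by
        intro hmem
        have hlen := length_of_mem_catAB hmem
        have := length_of_mem_genB _ _ t ht
        simp only [List.length_cons] at hlen
        omega)]
  rw [catAB_succ k c (by omega)]
  congr 1
  obtain ⟨m, hm⟩ : ∃ m : Nat, c = (m : Int) + 2 := ⟨(c - 2).toNat, by omega⟩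
  subst hm
  rw [show ((m : Int) + 2).toNat = m + 2 by omega, genB_two_eq]
  have hF : newF k ((m : Int) + 2) = fun a =>
      List.map (fun t => a :: t) (List.filter (fun t => decide (a ≥ 2 * t.headI)) (genB (k - a) (m + 1))) := by
    funext a
    rw [newF, show ((m : Int) + 2 - 1).toNat = m + 1 by omega]
  rw [hF, show ((m : Int) + 2 - 1).toNat = m + 1 by omega]

-- main equivalence of the two recursions
theorem Aaux_eq_catAB : ∀ (N : Nat) (c : Int), c.toNat ≤ N → ∀ k, Aaux k c = catAB k c := by
  intro N
  induction N with
  | zero =>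
    intro c hc k
    rw [Aaux_eq_foldl, PySem.List.pyRange_one_eq_nil (by omega), catAB_nonpos k c (by omega)]
    rfl
  | succ N ih =>
    intro c hc k
    by_cases hc0 : c ≤ 0
    · rw [Aaux_eq_foldl, PySem.List.pyRange_one_eq_nil (by omega), catAB_nonpos k c hc0]
      rfl
    by_cases hc1 : c = 1
    · subst hc1
      rw [Aaux_eq_foldl]
      rw [show (1:Int) + 1 = 1 + 1 from rfl, PySem.List.pyRange_one_singleton]
      rw [List.foldl_cons, List.foldl_nil, roundA, if_pos rfl]
      rw [catAB, PySem.List.pyRange_one_singleton]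
      simp [genB]
    · have hc2 : 2 ≤ c := by omega
      rw [Aaux_eq_foldl]
      rw [PySem.List.pyRange_one_succ_right (by omega : (1:Int) ≤ c)]
      rw [List.foldl_append, List.foldl_cons, List.foldl_nil]
      have hprev : (PySem.List.pyRange 1 c 1).foldl (roundA k) [] = catAB k (c - 1) := by
        rw [show c = (c - 1) + 1 by ring] 
        rw [← Aaux_eq_foldl]
        rw [ih (c-1) (by omega) k]
        congr 1
        ring
      rw [hprev]
      exact roundA_eq k c hc2 (fun bp => ih (c - 1) (by omega) (k - bp))

-- the alt assembles catAB at the effective cap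
theorem alt_eq_catAB (k cap : Int) :
    get_admissible_generators_for_degree_alt k cap
      = catAB k (if cap = -1 then (if 0 < k then (PySem.Int.bitLength k : Int) else 0) else cap) := by
  rw [get_admissible_generators_for_degree_alt]
  set blen : Int := if 0 < k then (PySem.Int.bitLength k : Int) else 0 with hblen
  set c : Int := if cap = -1 then blen else cap with hcdef
  rw [PySem.List.foldl_append_eq_flatMap]
  have hblen_nonneg : 0 ≤ blen := by
    rw [hblen]; split <;> simp
  by_cases hc0 : c ≤ 0
  · rw [catAB_nonpos k c hc0]
    rw [PySem.List.pyRange_one_eq_nil (by omega : min c blen + 1 ≤ 2)]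
    simp [hc0, show ¬ (1:Int) ≤ c by omega]
  · have hc1 : 1 ≤ c := by omega
    rw [if_pos hc1]
    have hcat : catAB k c = [[k]] ++ (PySem.List.pyRange 2 (c + 1) 1).flatMap (fun L => genB k L.toNat) := by
      rw [catAB, PySem.List.pyRange_one_cons (by omega : (1:Int) < c + 1)]
      rw [List.flatMap_cons]
      rfl
    rw [hcat]
    congr 1
    by_cases hk : 0 < k
    · have hblen' : blen = (PySem.Int.bitLength k : Int) := by rw [hblen, if_pos hk]
      have hbl1 : 1 ≤ blen := by
        have h1 := PySem.Int.lt_two_pow_bitLength k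
        rcases Nat.eq_zero_or_pos (PySem.Int.bitLength k) with h | h
        · rw [h] at h1; simp at h1; omega
        · omega
      by_cases hcb : c ≤ blen
      · rw [min_eq_left hcb]
      · push_neg at hcb
        rw [min_eq_right (by omega)]
        rw [PySem.List.pyRange_one_append 2 (blen + 1) (c + 1) (by omega) (by omega)]
        rw [List.flatMap_append]
        have hzero : (PySem.List.pyRange (blen + 1) (c + 1) 1).flatMap (fun L => genB k L.toNat) = [] := by
          rw [List.flatMap_eq_nil_iff]
          intro L hL
          have hm := PySem.List.mem_pyRange_one.mp hL
          exact genB_nil_of_big k L (by omega) (Or.inr ⟨hk, by omega⟩)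
        rw [hzero, List.append_nil]
    · push_neg at hk
      have hblen0 : blen = 0 := by rw [hblen, if_neg (by omega)]
      rw [hblen0]
      rw [min_eq_right (by omega)]
      rw [PySem.List.pyRange_one_eq_nil (by omega : (0:Int) + 1 ≤ 2)]
      rw [List.flatMap_nil]
      symm
      rw [List.flatMap_eq_nil_iff]
      intro L hL
      have hm := PySem.List.mem_pyRange_one.mp hL
      exact genB_nil_of_big k L (by omega) (Or.inl hk)

-- ===== VERDICT (by name: the statement is the Claim_ definition above) =====
theorem get_admissible_generators_for_degree_spec : Claim_equal_get_admissible_generators_for_degree := by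
  intro k cap _
  unfold Spec_get_admissible_generators_for_degree
  rw [get_admissible_generators_for_degree, alt_eq_catAB]
  rw [← bin_length_eq]
  exact Aaux_eq_catAB _ _ (le_refl _) k
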